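-- pv_equiv track=rewrite | github.com/timeyyy/pytknvim | pytknvim/tests/util.py | _remove_sidebar
-- ===== SOURCE A (Python) =====
-- def _remove_sidebar(line):
--     '''remove the numbers and space if they are there'''
--     found_numbers = False
--     found_char = False
--     for i, char in enumerate(line):
--         if not found_numbers:
--             try:
--                 int(char)
--             except ValueError:
--                 if char != ' ':
--                     found_char = True
--                 continue
--             else:
--                 found_numbers = True
--         else:
--             try:
--                 int(char)
--             except ValueError:
--                 break
--             else:
--                 continue
--     if found_numbers:
--         if not found_char:
--             return line[i+1:]
--         else:
--             raise Exception('chars where found in sidebar...',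
--                             line)
--     else:
--         return line
-- ===== SOURCE B (Python) =====
-- def _remove_sidebar(line):
--     '''remove the numbers and space if they are there'''
--     stripped = line.lstrip(' ')
--     rest = stripped.lstrip('0123456789')
--     k = len(stripped) - len(rest)
--     if k == 0:
--         return line
--     return stripped[k + 1:]
-- ===== Notes on version B (the rewrite author's own statement) =====
-- stated objective: simpler
-- what changed: Replaced A's char-by-char found_numbers/found_char flag state machine with two lstrip calls: drop leading spaces, measure the digit-run length k, and return stripped[k+1:] (or the line unchanged when no digit run starts it).
import Mathlib
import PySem

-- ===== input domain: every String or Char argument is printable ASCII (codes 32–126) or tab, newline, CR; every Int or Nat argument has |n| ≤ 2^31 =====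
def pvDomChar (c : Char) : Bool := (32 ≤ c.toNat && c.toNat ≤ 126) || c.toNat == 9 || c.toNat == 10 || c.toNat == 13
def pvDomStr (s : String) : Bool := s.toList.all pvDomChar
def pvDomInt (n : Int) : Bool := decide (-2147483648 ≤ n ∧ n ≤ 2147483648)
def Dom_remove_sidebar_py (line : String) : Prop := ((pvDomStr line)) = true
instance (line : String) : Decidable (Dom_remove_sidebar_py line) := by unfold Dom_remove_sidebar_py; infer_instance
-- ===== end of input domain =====

-- B replaces A's char-by-char flag state machine with an lstrip-based prefix-length computation (simpler); equivalence is about the return value on inputs where A does not raise.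

-- ===== PORT A =====
-- the for-loop with `break`; state = (found_numbers, found_char, i); idx is the enumerate index,
-- i : Int is Python's loop variable `i` (last processed index; -1 stands for "not yet bound",
-- never exposed when found_numbers is true).  int(char) succeeds exactly on '0'..'9' on the ASCII domain.
def pvLoopA : List Char → Nat → Bool → Bool → Int → Bool × Bool × Int
  | [], _, fn, fc, i => (fn, fc, i)
  | c :: rest, idx, fn, fc, i =>
    if fn = false then
      if c.isDigit then pvLoopA rest (idx + 1) true fc (idx : Int)
      else pvLoopA rest (idx + 1) fn (if c ≠ ' ' then true else fc) (idx : Int)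
    else
      if c.isDigit then pvLoopA rest (idx + 1) fn fc (idx : Int)
      else (fn, fc, (idx : Int))   -- break: i is the current index
  termination_by cs => cs.length

def remove_sidebar_py (line : String) : String :=
  let r := pvLoopA line.toList 0 false false (-1)
  if r.1 then
    if r.2.1 = false then String.ofList (line.toList.drop (r.2.2 + 1).toNat)  -- line[i+1:], i ≥ 0 here
    else ""   -- Python raises Exception here; excluded by Pre_
  else line

-- ===== PORT B =====
-- line.lstrip(' ') / stripped.lstrip('0123456789') ported as dropWhile (exact: lstrip(chars)
-- removes the longest prefix of chars in the set); stripped[k+1:] is a drop since k+1 ≥ 0.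
def remove_sidebar_py_alt (line : String) : String :=
  let stripped := line.toList.dropWhile (fun c => c == ' ')
  let rest := stripped.dropWhile (fun c => c.isDigit)
  let k := stripped.length - rest.length
  if k = 0 then line
  else String.ofList (stripped.drop (k + 1))

-- ===== PRECONDITION & SPEC =====
-- Pre_ excludes exactly the inputs on which A raises its sidebar Exception:
-- lines containing a digit preceded by some non-space character.
def Pre_remove_sidebar_py (line : String) : Prop :=
  (line.toList.all (fun c => !c.isDigit)) = true ∨
  ((line.toList.takeWhile (fun c => !c.isDigit)).all (fun c => c == ' ')) = true
instance (line : String) : Decidable (Pre_remove_sidebar_py line) := by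
  unfold Pre_remove_sidebar_py; infer_instance

def pvWitness_remove_sidebar_py : String := " 12 abc"

def Spec_remove_sidebar_py (line : String) (out : String) : Prop := out = remove_sidebar_py_alt line
instance (line : String) (out : String) : Decidable (Spec_remove_sidebar_py line out) := by unfold Spec_remove_sidebar_py; infer_instance

-- ===== CLAIM (what is proved, stated in full; the proofs are below) =====
def Claim_equal_remove_sidebar_py : Prop := ∀ (line : String), Dom_remove_sidebar_py line → Pre_remove_sidebar_py line → Spec_remove_sidebar_py line (remove_sidebar_py line)

-- ===== LEMMAS AND PROOFS =====

-- the space phase: found_numbers/found_char stay false, i tracks the index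
lemma pvLoopA_spaces (sp t : List Char) (idx : Nat)
    (hsp : ∀ c ∈ sp, c = ' ') :
    pvLoopA (sp ++ t) idx false false ((idx : Int) - 1)
      = pvLoopA t (idx + sp.length) false false ((idx : Int) + sp.length - 1) := by
  induction sp generalizing idx with
  | nil => simp
  | cons c sp ih =>
    have hc : c = ' ' := hsp c (by simp)
    have hcd : c.isDigit = false := by subst hc; decide
    rw [List.cons_append, pvLoopA, if_pos rfl, hcd]
    simp only [Bool.false_eq_true, if_false, hc, ne_eq, not_true_eq_false, if_false]
    have := ih (idx + 1) (fun c hc => hsp c (by simp [hc]))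
    push_cast at this
    rw [show ((idx : Int) + 1 - 1) = idx by ring] at this
    have h1 : idx + 1 + sp.length = idx + (' ' :: sp).length := by
      simp only [List.length_cons]; omega
    have h2 : (idx : Int) + 1 + (sp.length : Int) - 1 = (idx : Int) + ((' ' :: sp).length : Int) - 1 := by
      simp only [List.length_cons]; push_cast; ring
    rw [this, h1, h2]

-- the digit phase: found_numbers is true, digits are consumed, break (or end) fixes i
lemma pvLoopA_digits (ds t : List Char) (idx : Nat) (fc : Bool)
    (hds : ∀ c ∈ ds, c.isDigit = true)
    (ht : ∀ c, t.head? = some c → c.isDigit = false) :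
    pvLoopA (ds ++ t) idx true fc ((idx : Int) - 1)
      = (true, fc, if t.isEmpty then (idx : Int) + ds.length - 1 else (idx : Int) + ds.length) := by
  induction ds generalizing idx with
  | nil =>
    cases t with
    | nil => simp [pvLoopA]
    | cons c t =>
      have hc : c.isDigit = false := ht c rfl
      simp [pvLoopA, hc]
  | cons d ds ih =>
    have hd : d.isDigit = true := hds d (by simp)
    rw [List.cons_append, pvLoopA]
    simp only [if_neg (by simp : ¬ (true = false)), hd, if_true]
    have := ih (idx + 1) (fun c hc => hds c (by simp [hc]))
    push_cast at this
    rw [show ((idx : Int) + 1 - 1) = idx by ring] at this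
    rw [this]
    split <;> simp only [List.length_cons, Prod.mk.injEq, true_and] <;> push_cast <;> ring

-- no digit anywhere: found_numbers stays false
lemma pvLoopA_fn_false (cs : List Char) (idx : Nat) (fc : Bool) (i : Int)
    (h : ∀ c ∈ cs, c.isDigit = false) :
    (pvLoopA cs idx false fc i).1 = false := by
  induction cs generalizing idx fc i with
  | nil => simp [pvLoopA]
  | cons c cs ih =>
    have hc : c.isDigit = false := h c (by simp)
    rw [pvLoopA, if_pos rfl, hc]
    simp only [Bool.false_eq_true, if_false]
    exact ih (idx + 1) _ _ (fun c hc => h c (by simp [hc]))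

lemma dropWhile_head_false {p : Char → Bool} {l : List Char} {c : Char} {r : List Char}
    (h : l.dropWhile p = c :: r) : p c = false := by
  induction l with
  | nil => simp at h
  | cons a l ih =>
    rw [List.dropWhile_cons] at h
    by_cases ha : p a = true
    · rw [if_pos ha] at h; exact ih h
    · rw [if_neg ha] at h
      have : a = c := (List.cons.inj h).1
      subst this; simpa using ha

lemma takeWhile_append_all {q : Char → Bool} (l1 l2 : List Char)
    (h : ∀ c ∈ l1, q c = true) : (l1 ++ l2).takeWhile q = l1 ++ l2.takeWhile q := by
  induction l1 with
  | nil => simp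
  | cons a l1 ih =>
    rw [List.cons_append, List.takeWhile_cons, if_pos (h a (by simp))]
    rw [ih (fun c hc => h c (by simp [hc]))]
    rfl

lemma drop_append_length {α : Type} (l1 l2 : List α) (n : Nat) :
    (l1 ++ l2).drop (l1.length + n) = l2.drop n := by
  simp [List.drop_append]

-- the whole loop on a line of shape  spaces ++ digit :: (digits ++ rest)
lemma pvLoopA_full (sp : List Char) (d : Char) (ds t : List Char)
    (hsp : ∀ c ∈ sp, c = ' ') (hd : d.isDigit = true)
    (hds : ∀ c ∈ ds, c.isDigit = true)
    (ht : ∀ c, t.head? = some c → c.isDigit = false) :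
    pvLoopA (sp ++ d :: (ds ++ t)) 0 false false (-1)
      = (true, false, if t.isEmpty then ((sp.length : Int) + ds.length)
                      else ((sp.length : Int) + ds.length + 1)) := by
  have h1 := pvLoopA_spaces sp (d :: (ds ++ t)) 0 hsp
  norm_num at h1
  rw [h1]
  rw [pvLoopA, if_pos rfl, hd, if_pos rfl]
  have h2 := pvLoopA_digits ds t (sp.length + 1) false hds ht
  have e : (((sp.length + 1 : Nat)) : Int) - 1 = (sp.length : Int) := by push_cast; ring
  rw [e] at h2
  rw [h2]
  split <;> simp only [Prod.mk.injEq, true_and] <;> push_cast <;> ring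

-- ===== VERDICT (by name: the statement is the Claim_ definition above) =====
theorem remove_sidebar_py_spec : Claim_equal_remove_sidebar_py := by
  intro line _ hpre
  unfold Spec_remove_sidebar_py
  simp only [remove_sidebar_py, remove_sidebar_py_alt]
  have hsplit : line.toList.takeWhile (fun c => c == ' ') ++ line.toList.dropWhile (fun c => c == ' ')
      = line.toList := List.takeWhile_append_dropWhile
  set sp := line.toList.takeWhile (fun c => c == ' ') with hsp_def
  set rest := line.toList.dropWhile (fun c => c == ' ') with hrest_def
  have hsp_space : ∀ c ∈ sp, c = ' ' := by
    intro c hc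
    simpa using List.mem_takeWhile_imp hc
  by_cases hnd : ∀ c ∈ line.toList, c.isDigit = false
  · -- no digit anywhere: A returns line un-touched, B's k is 0
    have hA : (pvLoopA line.toList 0 false false (-1)).1 = false :=
      pvLoopA_fn_false _ 0 false (-1) hnd
    rw [if_neg (by simp [hA])]
    have hrest_nd : rest.dropWhile (fun c => c.isDigit) = rest := by
      cases hr : rest with
      | nil => simp
      | cons c r =>
        have hc : c.isDigit = false := by
          apply hnd
          rw [← hsplit, hr]; exact List.mem_append_right _ (by simp)
        rw [List.dropWhile_cons, hc]; simp
    rw [hrest_nd, Nat.sub_self, if_pos rfl]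
  · -- a digit exists; Pre_ forces the prefix before it to be all spaces
    have htw : ((line.toList.takeWhile (fun c => !c.isDigit)).all (fun c => c == ' ')) = true := by
      rcases hpre with h | h
      · exfalso; apply hnd; intro c hc
        simpa using List.all_eq_true.mp h c hc
      · exact h
    obtain ⟨d, r, hr⟩ : ∃ d r, rest = d :: r := by
      cases hr : rest with
      | nil =>
        exfalso; apply hnd; intro c hc
        have hcsp : c ∈ sp := by rw [← hsplit, hr, List.append_nil] at hc; exact hc
        have := hsp_space c hcsp; subst this; decide
      | cons d r => exact ⟨d, r, rfl⟩
    have hrdrop : line.toList.dropWhile (fun c => c == ' ') = d :: r := hrest_def.symm.trans hr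
    have hd_digit : d.isDigit = true := by
      by_contra hdd
      have hdd' : d.isDigit = false := by simpa using hdd
      have hd_mem : d ∈ line.toList.takeWhile (fun c => !c.isDigit) := by
        rw [← hsplit, takeWhile_append_all sp rest
              (fun c hc => by have := hsp_space c hc; subst this; decide)]
        rw [hr, List.takeWhile_cons, if_pos (by simp [hdd'])]
        exact List.mem_append_right _ (by simp)
      have hd_sp : d = ' ' := by simpa using List.all_eq_true.mp htw d hd_mem
      have := dropWhile_head_false hrdrop
      rw [hd_sp] at this; simp at this
    have hrsplit : r.takeWhile (fun c => c.isDigit) ++ r.dropWhile (fun c => c.isDigit) = r :=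
      List.takeWhile_append_dropWhile
    set ds := r.takeWhile (fun c => c.isDigit) with hds_def
    set t := r.dropWhile (fun c => c.isDigit) with ht_def
    have hds_digit : ∀ c ∈ ds, c.isDigit = true := fun c hc => by
      simpa using List.mem_takeWhile_imp hc
    have ht_head : ∀ c, t.head? = some c → c.isDigit = false := by
      intro c hc
      cases ht : t with
      | nil => rw [ht] at hc; simp at hc
      | cons c' t' =>
        rw [ht] at hc
        simp only [List.head?_cons, Option.some.injEq] at hc
        subst hc
        exact dropWhile_head_false (ht_def.symm.trans ht)
    have hm : line.toList = sp ++ d :: (ds ++ t) := by rw [← hsplit, hr, hrsplit]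
    have hstep : pvLoopA line.toList 0 false false (-1)
        = (true, false, if t.isEmpty then ((sp.length : Int) + ds.length)
                        else ((sp.length : Int) + ds.length + 1)) := by
      rw [hm]; exact pvLoopA_full sp d ds t hsp_space hd_digit hds_digit ht_head
    have hBdrop : (d :: r).dropWhile (fun c => c.isDigit) = t := by
      rw [List.dropWhile_cons]
      simp only [hd_digit, if_true]
      exact ht_def.symm
    have hrl : r.length = ds.length + t.length := by
      conv_lhs => rw [← hrsplit]
      simp
    have hk : (d :: r).length - t.length = ds.length + 1 := by
      simp only [List.length_cons]; omega
    rw [hstep, hr, hBdrop, hk, if_neg (by omega : ¬ (ds.length + 1 = 0))]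
    by_cases hte : t.isEmpty = true
    · have ht_nil : t = [] := List.isEmpty_iff.mp hte
      rw [if_pos hte]
      show String.ofList (line.toList.drop (((sp.length : Int) + ds.length + 1).toNat))
          = String.ofList ((d :: r).drop (ds.length + 1 + 1))
      congr 1
      have hA' : ((sp.length : Int) + ds.length + 1).toNat = sp.length + (ds.length + 1) := by omega
      rw [hA', hm, ht_nil, drop_append_length]
      rw [List.drop_eq_nil_iff.mpr (by simp)]
      rw [List.drop_eq_nil_iff.mpr (by simp [hrl, ht_nil])]
    · rw [if_neg hte]
      show String.ofList (line.toList.drop (((sp.length : Int) + ds.length + 1 + 1).toNat))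
          = String.ofList ((d :: r).drop (ds.length + 1 + 1))
      congr 1
      have hA' : ((sp.length : Int) + ds.length + 1 + 1).toNat = sp.length + (ds.length + 1 + 1) := by omega
      rw [hA', hm, drop_append_length, hrsplit]
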